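-- pv_equiv track=rewrite | github.com/CADSV/Graphs_Program_III_Project | proyecto_grafos.py | sonVerticesVisitables
-- ===== SOURCE A (Python) =====
-- def sonVerticesVisitables(lista):
-- 	verticesVisitables={}  #Diccionario que contiene el número de los vértices con los cuales cada vértice tiene una arista en común, y que por ende es visitable.
-- 	numVertices=lista[0]
-- 	numVertices=numVertices[0]
--
-- 	for i in range(1,numVertices+1):
-- 		verticesVisitables[i]=[]
-- 		for j in range(1,numVertices+1):
-- 			if (([i,j] in lista) or ([j,i] in lista)):
-- 				vertices=verticesVisitables[i]
-- 				vertices.append(j)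
-- 				verticesVisitables[i]=vertices
--
-- 	return verticesVisitables
-- ===== SOURCE B (Python) =====
-- def sonVerticesVisitables(lista):
-- 	numVertices = lista[0][0]
-- 	neighbors = {i: set() for i in range(1, numVertices + 1)}
-- 	for e in lista:
-- 		if len(e) == 2:
-- 			a, b = e
-- 			if 1 <= a <= numVertices and 1 <= b <= numVertices:
-- 				neighbors[a].add(b)
-- 				neighbors[b].add(a)
-- 	return {i: sorted(neighbors[i]) for i in range(1, numVertices + 1)}
-- ===== Notes on version B (the rewrite author's own statement) =====
-- stated objective: faster
-- what changed: A scans the whole edge list for [i,j] and [j,i] for every ordered vertex pair; B makes one pass over the edge list building per-vertex neighbour sets and then emits each set sorted.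
import Mathlib
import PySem

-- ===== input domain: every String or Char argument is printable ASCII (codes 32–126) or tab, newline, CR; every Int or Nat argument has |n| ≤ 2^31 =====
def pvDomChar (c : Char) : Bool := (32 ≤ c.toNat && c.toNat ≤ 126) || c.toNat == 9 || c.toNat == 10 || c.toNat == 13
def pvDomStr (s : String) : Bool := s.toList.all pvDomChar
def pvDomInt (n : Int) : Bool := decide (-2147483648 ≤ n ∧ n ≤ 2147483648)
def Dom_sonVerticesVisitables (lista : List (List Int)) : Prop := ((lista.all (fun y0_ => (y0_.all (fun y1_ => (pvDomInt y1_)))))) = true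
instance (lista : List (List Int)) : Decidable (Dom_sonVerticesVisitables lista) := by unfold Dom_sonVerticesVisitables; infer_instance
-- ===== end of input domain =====

-- B replaces A's per-pair membership scans over the edge list with one pass over the edge
-- list building per-vertex neighbour sets, then outputs each set sorted (objective: faster).

-- ===== PORT A =====
def sonVerticesVisitables (lista : List (List Int)) : List (Int × List Int) :=
  match lista with
  | [] => []            -- lista[0] raises IndexError: excluded by Pre_
  | first :: _ =>
    match first with
    | [] => []          -- numVertices[0] raises IndexError: excluded by Pre_
    | n :: _ =>
      ((PySem.List.pyRange 1 (n + 1) 1).foldl (fun d i =>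
          (PySem.List.pyRange 1 (n + 1) 1).foldl (fun d j =>
            if lista.contains [i, j] || lista.contains [j, i] then
              d.insert i (d.getD i [] ++ [j])
            else d)
            (d.insert i ([] : List Int)))
        PySem.Dict.empty).items

-- ===== PORT B =====
-- B's edge-pass loop body: if len(e)==2 and both endpoints are in 1..n, add each to the other's set
def pvAltStep (n : Int) (d : PySem.Dict Int (PySem.Set Int)) (e : List Int) : PySem.Dict Int (PySem.Set Int) :=
  match e with
  | [a, b] =>
      if 1 ≤ a ∧ a ≤ n ∧ 1 ≤ b ∧ b ≤ n then
        (d.modify a [] (fun s => PySem.Set.add s b)).modify b [] (fun s => PySem.Set.add s a)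
      else d
  | _ => d

def sonVerticesVisitables_alt (lista : List (List Int)) : List (Int × List Int) :=
  match lista with
  | [] => []            -- lista[0][0] raises IndexError: excluded by Pre_
  | first :: _ =>
    match first with
    | [] => []
    | n :: _ =>
      let init : PySem.Dict Int (PySem.Set Int) :=
        (PySem.List.pyRange 1 (n + 1) 1).foldl (fun d i => d.insert i PySem.Set.empty) PySem.Dict.empty
      let nb := lista.foldl (pvAltStep n) init
      (PySem.List.pyRange 1 (n + 1) 1).map
        (fun i => (i, PySem.List.sorted (nb.getD i []) (fun x => x) false))

-- ===== PRECONDITION & SPEC =====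
-- Pre_ excludes exactly the inputs where A raises IndexError: an empty lista or an empty lista[0].
def Pre_sonVerticesVisitables (lista : List (List Int)) : Prop := lista ≠ [] ∧ lista.headI ≠ []
instance (lista : List (List Int)) : Decidable (Pre_sonVerticesVisitables lista) := by unfold Pre_sonVerticesVisitables; infer_instance
def pvWitness_sonVerticesVisitables : List (List Int) := [[2], [1, 2]]

def Spec_sonVerticesVisitables (lista : List (List Int)) (out : List (Int × List Int)) : Prop := out = sonVerticesVisitables_alt lista
instance (lista : List (List Int)) (out : List (Int × List Int)) : Decidable (Spec_sonVerticesVisitables lista out) := by unfold Spec_sonVerticesVisitables; infer_instance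

-- ===== CLAIM (what is proved, stated in full; the proofs are below) =====
def Claim_equal_sonVerticesVisitables : Prop := ∀ (lista : List (List Int)), Dom_sonVerticesVisitables lista → Pre_sonVerticesVisitables lista → Spec_sonVerticesVisitables lista (sonVerticesVisitables lista)

-- ===== LEMMAS AND PROOFS =====

-- the common middle form: vertex i ↦ the ascending list of the j in 1..n joined to i by some edge
def pvEdgeCond (lista : List (List Int)) (i j : Int) : Bool := lista.contains [i, j] || lista.contains [j, i]

-- A's inner j-loop appends to key i exactly the j satisfying the edge condition, in range order
theorem pvInnerA (lista : List (List Int)) (i : Int) (R : List Int) :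
    ∀ (d : PySem.Dict Int (List Int)) (v : List Int),
      R.foldl (fun d j =>
          if lista.contains [i, j] || lista.contains [j, i] then
            d.insert i (d.getD i [] ++ [j])
          else d) (d.insert i v)
        = d.insert i (v ++ R.filter (pvEdgeCond lista i)) := by
  induction R with
  | nil => simp
  | cons j R ih =>
    intro d v
    simp only [List.foldl_cons, List.filter_cons, pvEdgeCond]
    by_cases h : (lista.contains [i, j] || lista.contains [j, i]) = true
    · rw [if_pos h, PySem.Dict.getD_insert_self, PySem.Dict.insert_insert_self, ih]
      simp only [Bool.or_eq_true, List.contains_eq_mem, decide_eq_true_eq] at h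
      simp [h]
    · rw [if_neg h, ih]
      simp only [Bool.or_eq_true, List.contains_eq_mem, decide_eq_true_eq, not_or] at h
      simp [h]

-- what one edge entry contributes to vertex i's neighbour set in B's pass
def pvAdds (n : Int) (e : List Int) (i j : Int) : Prop :=
  ∃ a b, e = [a, b] ∧ (1 ≤ a ∧ a ≤ n ∧ 1 ≤ b ∧ b ≤ n) ∧ ((a = i ∧ b = j) ∨ (b = i ∧ a = j))

theorem pvAdds_pair (n a b i j : Int) :
    pvAdds n [a, b] i j ↔ (1 ≤ a ∧ a ≤ n ∧ 1 ≤ b ∧ b ≤ n) ∧ ((a = i ∧ b = j) ∨ (b = i ∧ a = j)) := by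
  constructor
  · rintro ⟨a', b', he, hr, hc⟩
    injection he with h1 h2; injection h2 with h2 _; subst h1; subst h2; exact ⟨hr, hc⟩
  · rintro ⟨hr, hc⟩; exact ⟨a, b, rfl, hr, hc⟩

theorem pvStepMem (n : Int) (e : List Int) (d : PySem.Dict Int (PySem.Set Int)) (i j : Int) :
    (j ∈ (pvAltStep n d e).getD i []) ↔ j ∈ d.getD i [] ∨ pvAdds n e i j := by
  match e with
  | [] => simp [pvAltStep, pvAdds]
  | [a] => simp [pvAltStep, pvAdds]
  | (a :: b :: c :: t) => simp [pvAltStep, pvAdds]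
  | [a, b] =>
    simp only [pvAltStep]
    by_cases hr : 1 ≤ a ∧ a ≤ n ∧ 1 ≤ b ∧ b ≤ n
    · rw [if_pos hr]
      rw [PySem.Dict.getD_modify, PySem.Dict.getD_modify, PySem.Dict.getD_modify]
      rw [pvAdds_pair]
      simp only [hr, true_and]
      split_ifs with h1 h2 h3 <;> first
        | (simp only [PySem.Set.mem_add]; aesop)
        | aesop
    · rw [if_neg hr]
      simp only [pvAdds_pair]
      tauto

theorem pvMemFoldB (n : Int) (l : List (List Int)) :
    ∀ (d : PySem.Dict Int (PySem.Set Int)) (i j : Int),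
      (j ∈ (l.foldl (pvAltStep n) d).getD i []) ↔ j ∈ d.getD i [] ∨ ∃ e ∈ l, pvAdds n e i j := by
  induction l with
  | nil => simp
  | cons e l ih =>
    intro d i j
    simp only [List.foldl_cons, ih, pvStepMem, List.mem_cons]
    constructor
    · rintro ((h | h) | ⟨e', he', h⟩)
      · exact Or.inl h
      · exact Or.inr ⟨e, Or.inl rfl, h⟩
      · exact Or.inr ⟨e', Or.inr he', h⟩
    · rintro (h | ⟨e', (rfl | he'), h⟩)
      · exact Or.inl (Or.inl h)
      · exact Or.inl (Or.inr h)
      · exact Or.inr ⟨e', he', h⟩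

theorem pvNodupStep (n : Int) (e : List Int) (d : PySem.Dict Int (PySem.Set Int)) (i : Int)
    (h : (d.getD i []).Nodup) : ((pvAltStep n d e).getD i []).Nodup := by
  match e with
  | [] => exact h
  | [a] => exact h
  | (a :: b :: c :: t) => exact h
  | [a, b] =>
    simp only [pvAltStep]
    split_ifs with hr
    · rw [PySem.Dict.getD_modify, PySem.Dict.getD_modify, PySem.Dict.getD_modify]
      split_ifs with h1 h2 h3 <;> subst_vars <;> first
        | exact h
        | exact PySem.Set.nodup_add _ _ h
        | exact PySem.Set.nodup_add _ _ (PySem.Set.nodup_add _ _ h)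
    · exact h

theorem pvNodupFoldB (n : Int) (l : List (List Int)) :
    ∀ (d : PySem.Dict Int (PySem.Set Int)) (i : Int),
      (d.getD i []).Nodup → ((l.foldl (pvAltStep n) d).getD i []).Nodup := by
  induction l with
  | nil => intro d i h; exact h
  | cons e l ih => intro d i h; exact ih _ _ (pvNodupStep n e d i h)

theorem pvInitB (R : List Int) :
    ∀ (d : PySem.Dict Int (PySem.Set Int)) (i : Int),
      d.getD i [] = [] → (R.foldl (fun d k => d.insert k PySem.Set.empty) d).getD i [] = [] := by
  induction R with
  | nil => intro d i h; exact h
  | cons k R ih =>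
    intro d i h
    refine ih _ _ ?_
    rw [PySem.Dict.getD_insert]
    split_ifs with hk
    · rfl
    · exact h

-- for a vertex i of 1..n, B's sorted neighbour set is exactly A's filtered range
theorem pvSortedB (lista : List (List Int)) (n i : Int) (hi : 1 ≤ i ∧ i < n + 1) :
    PySem.List.sorted
        ((lista.foldl (pvAltStep n)
            ((PySem.List.pyRange 1 (n + 1) 1).foldl (fun d k => d.insert k PySem.Set.empty) PySem.Dict.empty)).getD i [])
        (fun x => x) false
      = (PySem.List.pyRange 1 (n + 1) 1).filter (pvEdgeCond lista i) := by
  have hinit : ((PySem.List.pyRange 1 (n + 1) 1).foldl (fun d k => d.insert k PySem.Set.empty)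
      (PySem.Dict.empty : PySem.Dict Int (PySem.Set Int))).getD i [] = [] :=
    pvInitB _ _ _ (by simp [PySem.Dict.getD_empty])
  set s := (lista.foldl (pvAltStep n) _).getD i [] with hs
  have hnodup : s.Nodup := pvNodupFoldB n lista _ i (by rw [hinit]; exact List.nodup_nil)
  have hmem : ∀ j, j ∈ s ↔ j ∈ (PySem.List.pyRange 1 (n + 1) 1).filter (pvEdgeCond lista i) := by
    intro j
    rw [hs, pvMemFoldB, hinit]
    simp only [List.not_mem_nil, false_or, List.mem_filter, PySem.List.mem_pyRange_one, pvEdgeCond,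
      Bool.or_eq_true, List.contains_eq_mem, decide_eq_true_eq]
    constructor
    · rintro ⟨e, he, a, b, rfl, hr, (⟨rfl, rfl⟩ | ⟨rfl, rfl⟩)⟩
      · exact ⟨⟨hr.2.2.1, by omega⟩, Or.inl he⟩
      · exact ⟨⟨hr.1, by omega⟩, Or.inr he⟩
    · rintro ⟨⟨hj1, hj2⟩, (he | he)⟩
      · exact ⟨[i, j], he, i, j, rfl, ⟨hi.1, by omega, hj1, by omega⟩, Or.inl ⟨rfl, rfl⟩⟩
      · exact ⟨[j, i], he, j, i, rfl, ⟨hj1, by omega, hi.1, by omega⟩, Or.inr ⟨rfl, rfl⟩⟩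
  apply PySem.List.sorted_eq_of_perm_of_pairwise_lt
  · rw [List.perm_ext_iff_of_nodup (List.Nodup.filter _ (PySem.List.nodup_pyRange_one 1 (n+1))) hnodup]
    intro a; rw [hmem a]
  · exact List.Pairwise.filter _ (PySem.List.pairwise_lt_pyRange_one 1 (n+1))

-- ===== VERDICT (by name: the statement is the Claim_ definition above) =====
theorem sonVerticesVisitables_spec : Claim_equal_sonVerticesVisitables := by
  intro lista _ hpre
  unfold Spec_sonVerticesVisitables
  match hl : lista with
  | [] => exact absurd rfl hpre.1
  | [] :: rest => exact absurd rfl hpre.2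
  | (n :: ft) :: rest =>
    simp only [sonVerticesVisitables, sonVerticesVisitables_alt]
    -- A's side: each outer iteration inserts the filtered range at the fresh key i
    have hcongr : ∀ (d : PySem.Dict Int (List Int)) (i : Int),
        (PySem.List.pyRange 1 (n + 1) 1).foldl (fun d j =>
            if ((n :: ft) :: rest).contains [i, j] || ((n :: ft) :: rest).contains [j, i] then
              d.insert i (d.getD i [] ++ [j])
            else d) (d.insert i ([] : List Int))
          = d.insert i ((PySem.List.pyRange 1 (n + 1) 1).filter (pvEdgeCond ((n :: ft) :: rest) i)) := by
      intro d i
      rw [pvInnerA]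
      simp
    have hF := PySem.List.foldl_congr_mem (PySem.List.pyRange 1 (n + 1) 1)
        (fun (d : PySem.Dict Int (List Int)) i =>
          (PySem.List.pyRange 1 (n + 1) 1).foldl (fun d j =>
            if ((n :: ft) :: rest).contains [i, j] || ((n :: ft) :: rest).contains [j, i] then
              d.insert i (d.getD i [] ++ [j])
            else d)
            (d.insert i ([] : List Int)))
        (fun d i => d.insert i ((PySem.List.pyRange 1 (n + 1) 1).filter (pvEdgeCond ((n :: ft) :: rest) i)))
        PySem.Dict.empty
        (fun acc x _ => hcongr acc x)
    rw [hF]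
    have hI := PySem.Dict.items_foldl_insert_fresh (l := PySem.List.pyRange 1 (n + 1) 1)
        (k := fun (i : Int) => i)
        (v := fun i => (PySem.List.pyRange 1 (n + 1) 1).filter (pvEdgeCond ((n :: ft) :: rest) i))
        (d := PySem.Dict.empty)
        (by intro a _; exact PySem.Dict.contains_empty a)
        (by simpa using PySem.List.nodup_pyRange_one 1 (n + 1))
    rw [show (fun (d : PySem.Dict Int (List Int)) (i : Int) =>
          d.insert i ((PySem.List.pyRange 1 (n + 1) 1).filter (pvEdgeCond ((n :: ft) :: rest) i)))
        = (fun (d : PySem.Dict Int (List Int)) (i : Int) =>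
          d.insert ((fun (i : Int) => i) i) ((fun i => (PySem.List.pyRange 1 (n + 1) 1).filter (pvEdgeCond ((n :: ft) :: rest) i)) i))
        from rfl, hI]
    apply List.map_congr_left
    intro i hi
    rw [pvSortedB ((n :: ft) :: rest) n i ((PySem.List.mem_pyRange_one).1 hi)]
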